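-- pv_equiv track=rewrite | github.com/Josemarialanda/PSO | test_problems.py | aphe_5
-- ===== SOURCE A (Python) =====
-- def aphe_5(x1,x2,x3,x4,x5):
--     x = [x1,x2,x3,x4,x5]
--     i = [1,2,3,4,5]
--     res = 0
--     for j in range(5):
--         xi = x[j]
--         ii = i[j]
--         res = res + ii*xi**2
--     return res
-- ===== SOURCE B (Python) =====
-- def aphe_5(x1, x2, x3, x4, x5):
--     # Summation-by-parts: sum k*x_k^2 equals the sum of all suffix sums of
--     # the squares, so a single backward pass with a running suffix sum needs
--     # no weight multiplications at all.
--     total = 0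
--     running = 0
--     for v in (x5, x4, x3, x2, x1):
--         running += v * v
--         total += running
--     return total
-- ===== Notes on version B (the rewrite author's own statement) =====
-- stated objective: alternative
-- what changed: Replaced the indexed weight-lookup loop by the summation-by-parts identity: one backward pass accumulates a running suffix sum of squares and sums those suffix sums, eliminating the weight list and all weight multiplications.
import Mathlib
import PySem

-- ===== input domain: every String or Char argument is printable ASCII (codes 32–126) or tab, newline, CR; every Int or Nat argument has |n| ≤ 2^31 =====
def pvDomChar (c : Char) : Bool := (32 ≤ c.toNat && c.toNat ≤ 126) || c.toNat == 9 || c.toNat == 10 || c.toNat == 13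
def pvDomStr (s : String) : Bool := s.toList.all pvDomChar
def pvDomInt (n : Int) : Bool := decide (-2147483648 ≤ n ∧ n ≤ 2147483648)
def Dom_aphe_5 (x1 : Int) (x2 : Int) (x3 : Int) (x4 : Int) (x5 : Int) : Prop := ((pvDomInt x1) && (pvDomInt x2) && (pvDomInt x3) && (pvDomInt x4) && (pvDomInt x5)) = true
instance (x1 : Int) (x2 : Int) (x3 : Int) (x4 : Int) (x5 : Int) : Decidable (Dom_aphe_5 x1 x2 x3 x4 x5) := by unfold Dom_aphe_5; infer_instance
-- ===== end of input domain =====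

-- ===== PORT A =====
-- Port of A: lists of values and weights, fold over range(5) accumulating res + i[j]*x[j]**2.
def aphe_5 (x1 : Int) (x2 : Int) (x3 : Int) (x4 : Int) (x5 : Int) : Int :=
  let x : List Int := [x1, x2, x3, x4, x5]
  let i : List Int := [1, 2, 3, 4, 5]
  (PySem.List.pyRange 0 5 1).foldl (fun res j =>
    let xi := PySem.List.pyGetD x j 0
    let ii := PySem.List.pyGetD i j 0
    res + ii * xi ^ 2) 0

-- ===== PORT B =====
-- Port of B: summation-by-parts — one backward pass over (x5,…,x1) with a running
-- suffix sum of squares and a total of those suffix sums; no weight list, no weights.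
def aphe_5_alt (x1 : Int) (x2 : Int) (x3 : Int) (x4 : Int) (x5 : Int) : Int :=
  (([x5, x4, x3, x2, x1] : List Int).foldl
    (fun (st : Int × Int) v =>
      let running := st.2 + v * v
      (st.1 + running, running)) (0, 0)).1

-- ===== PRECONDITION & SPEC =====
def Spec_aphe_5 (x1 : Int) (x2 : Int) (x3 : Int) (x4 : Int) (x5 : Int) (out : Int) : Prop := out = aphe_5_alt x1 x2 x3 x4 x5
instance (x1 : Int) (x2 : Int) (x3 : Int) (x4 : Int) (x5 : Int) (out : Int) : Decidable (Spec_aphe_5 x1 x2 x3 x4 x5 out) := by unfold Spec_aphe_5; infer_instance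

-- ===== CLAIM =====
def Claim_equal_aphe_5 : Prop := ∀ (x1 : Int) (x2 : Int) (x3 : Int) (x4 : Int) (x5 : Int), Dom_aphe_5 x1 x2 x3 x4 x5 → Spec_aphe_5 x1 x2 x3 x4 x5 (aphe_5 x1 x2 x3 x4 x5)

-- ===== LEMMAS AND PROOFS =====

-- ===== VERDICT =====
theorem aphe_5_spec : Claim_equal_aphe_5 := by
  intro x1 x2 x3 x4 x5 _
  show aphe_5 x1 x2 x3 x4 x5 = aphe_5_alt x1 x2 x3 x4 x5
  simp [aphe_5, aphe_5_alt, PySem.List.pyRange,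
        List.range_succ, PySem.List.pyGetD, PySem.List.pyGet?, PySem.List.pyIdx?,
        List.foldl]
  ring
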